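-- pv_equiv track=rewrite | github.com/Web-Search-M-Course-Project/WSM_project | light.py | zipper2
-- ===== SOURCE A (Python) =====
-- def zipper2(l_paper_id:list, l_title:list, l_score:list):
--     all = list(zip(l_score, l_paper_id, l_title))
--     tmp1 = {}
--     for score,paper_id,title in all:
--         if title not in tmp1 or tmp1[title] < (score, paper_id):
--             tmp1[title] = (score, paper_id)
--     tmp2 = [(tmp1[title][0],tmp1[title][1],title) for title in tmp1]
--     return list(reversed(sorted(tmp2)))
-- ===== SOURCE B (Python) =====
-- def zipper2(l_paper_id: list, l_title: list, l_score: list):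
--     seen = set()
--     res = []
--     for rec in sorted(zip(l_score, l_paper_id, l_title), reverse=True):
--         if rec[2] not in seen:
--             seen.add(rec[2])
--             res.append(rec)
--     return res
-- ===== Notes on version B (the rewrite author's own statement) =====
-- stated objective: alternative
-- what changed: A builds a dict of per-title running maxima and then sorts the dict's entries and reverses; B sorts all zipped records descending once and keeps the first record of each title in a single seen-set pass, which is already the required order.
import Mathlib
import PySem

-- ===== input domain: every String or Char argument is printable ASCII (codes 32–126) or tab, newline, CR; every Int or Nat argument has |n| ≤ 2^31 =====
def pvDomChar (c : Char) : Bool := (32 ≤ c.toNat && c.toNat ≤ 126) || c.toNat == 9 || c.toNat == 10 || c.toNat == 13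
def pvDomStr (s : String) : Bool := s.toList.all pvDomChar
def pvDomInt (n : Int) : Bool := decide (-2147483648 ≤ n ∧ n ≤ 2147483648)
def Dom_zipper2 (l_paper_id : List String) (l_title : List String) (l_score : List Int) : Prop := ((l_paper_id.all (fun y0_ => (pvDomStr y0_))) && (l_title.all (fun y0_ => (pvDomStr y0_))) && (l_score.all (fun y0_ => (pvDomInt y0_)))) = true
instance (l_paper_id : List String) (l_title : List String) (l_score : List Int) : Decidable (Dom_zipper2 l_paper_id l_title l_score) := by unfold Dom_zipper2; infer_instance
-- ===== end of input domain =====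

-- B replaces A's dict-of-running-maxima followed by sort-and-reverse by one descending sort
-- followed by a single seen-set scan keeping the first record of each title (objective:
-- alternative — a different algorithm of the same O(n log n) cost).

-- Python's tuple order on a triple (score, paper_id, title): lexicographic (used by both ports)
def key3 (x : Int × String × String) : Lex (Int × Lex (String × String)) :=
  toLex (x.1, toLex (x.2.1, x.2.2))

-- ===== PORT A =====
-- one step of A's loop: 'if title not in tmp1 or tmp1[title] < (score, paper_id): tmp1[title] = (score, paper_id)'
def pvStepA (d : PySem.Dict String (Int × String)) (e : Int × String × String) :
    PySem.Dict String (Int × String) :=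
  match d.get? e.2.2 with
  | none => d.insert e.2.2 (e.1, e.2.1)
  | some v => if toLex v < toLex (e.1, e.2.1) then d.insert e.2.2 (e.1, e.2.1) else d

def zipper2 (l_paper_id : List String) (l_title : List String) (l_score : List Int) :
    List (Int × String × String) :=
  let all := l_score.zip (l_paper_id.zip l_title)
  let tmp1 := all.foldl pvStepA PySem.Dict.empty
  let tmp2 := tmp1.items.map (fun kv => (kv.2.1, kv.2.2, kv.1))
  (PySem.List.sorted tmp2 key3 false).reverse

-- ===== PORT B =====
-- one step of B's loop: 'if rec[2] not in seen: seen.add(rec[2]); res.append(rec)'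
def pvStepB (st : PySem.Set String × List (Int × String × String)) (e : Int × String × String) :
    PySem.Set String × List (Int × String × String) :=
  if PySem.Set.contains st.1 e.2.2 then st else (PySem.Set.add st.1 e.2.2, st.2 ++ [e])

def zipper2_alt (l_paper_id : List String) (l_title : List String) (l_score : List Int) :
    List (Int × String × String) :=
  ((PySem.List.sorted (l_score.zip (l_paper_id.zip l_title)) key3 true).foldl pvStepB
    (PySem.Set.empty, [])).2

-- ===== PRECONDITION & SPEC =====
def Spec_zipper2 (l_paper_id : List String) (l_title : List String) (l_score : List Int) (out : List (Int × String × String)) : Prop := out = zipper2_alt l_paper_id l_title l_score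
instance (l_paper_id : List String) (l_title : List String) (l_score : List Int) (out : List (Int × String × String)) : Decidable (Spec_zipper2 l_paper_id l_title l_score out) := by unfold Spec_zipper2; infer_instance

-- ===== CLAIM (what is proved, stated in full; the proofs are below) =====
def Claim_equal_zipper2 : Prop := ∀ (l_paper_id : List String) (l_title : List String) (l_score : List Int), Dom_zipper2 l_paper_id l_title l_score → Spec_zipper2 l_paper_id l_title l_score (zipper2 l_paper_id l_title l_score)

-- ===== LEMMAS AND PROOFS =====

-- running maximum of the pairs (score, paper_id) seen for one title: A's update, iterated
def pvOmax (o : Option (Int × String)) (e : Int × String × String) : Option (Int × String) :=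
  some (match o with
        | none => (e.1, e.2.1)
        | some v => if toLex v < toLex (e.1, e.2.1) then (e.1, e.2.1) else v)

theorem pvStepA_get?_same (d : PySem.Dict String (Int × String)) (e : Int × String × String) :
    (pvStepA d e).get? e.2.2 = pvOmax (d.get? e.2.2) e := by
  unfold pvStepA pvOmax
  cases hg : d.get? e.2.2 with
  | none => simp [hg, PySem.Dict.get?_insert_self]
  | some v =>
    simp only [hg]
    split_ifs with hlt
    · simp [PySem.Dict.get?_insert_self]
    · simp [hg]

theorem pvStepA_get?_ne (d : PySem.Dict String (Int × String)) (e : Int × String × String)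
    (t : String) (h : e.2.2 ≠ t) : (pvStepA d e).get? t = d.get? t := by
  unfold pvStepA
  cases hg : d.get? e.2.2 with
  | none =>
    dsimp only
    apply PySem.Dict.get?_insert_of_ne
    exact Ne.symm h
  | some v =>
    dsimp only
    split_ifs with hlt
    · apply PySem.Dict.get?_insert_of_ne
      exact Ne.symm h
    · rfl

theorem foldl_pvStepA_get? (l : List (Int × String × String))
    (d : PySem.Dict String (Int × String)) (t : String) :
    (l.foldl pvStepA d).get? t = (l.filter (fun e => e.2.2 == t)).foldl pvOmax (d.get? t) := by
  induction l generalizing d with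
  | nil => rfl
  | cons e l ih =>
    rw [List.foldl_cons, ih, List.filter_cons]
    by_cases he : e.2.2 = t
    · subst he
      simp only [BEq.rfl, if_pos, List.foldl_cons]
      rw [pvStepA_get?_same]
    · have hbe : (e.2.2 == t) = false := by simp [he]
      rw [hbe, pvStepA_get?_ne d e t he]
      simp

theorem foldl_pvOmax_some (ps : List (Int × String × String)) (v : Int × String) :
    ∃ m, ps.foldl pvOmax (some v) = some m ∧ (m = v ∨ ∃ e ∈ ps, (e.1, e.2.1) = m) ∧
      toLex v ≤ toLex m ∧ ∀ e ∈ ps, toLex (e.1, e.2.1) ≤ toLex m := by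
  induction ps generalizing v with
  | nil => exact ⟨v, rfl, Or.inl rfl, le_refl _, by simp⟩
  | cons e ps ih =>
    rw [List.foldl_cons]
    have hstep : pvOmax (some v) e =
        some (if toLex v < toLex (e.1, e.2.1) then (e.1, e.2.1) else v) := rfl
    rw [hstep]
    obtain ⟨m, hm, hsrc, hge, hub⟩ := ih (if toLex v < toLex (e.1, e.2.1) then (e.1, e.2.1) else v)
    refine ⟨m, hm, ?_, ?_, ?_⟩
    · rcases hsrc with h | ⟨e', he', hpe⟩
      · split_ifs at h with hlt
        · exact Or.inr ⟨e, List.mem_cons_self, h.symm ▸ rfl⟩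
        · exact Or.inl h
      · exact Or.inr ⟨e', List.mem_cons_of_mem _ he', hpe⟩
    · refine le_trans ?_ hge
      split_ifs with hlt
      · exact le_of_lt hlt
      · exact le_refl _
    · intro e' he'
      rcases List.mem_cons.mp he' with h | h
      · subst h
        refine le_trans ?_ hge
        split_ifs with hlt
        · exact le_refl _
        · exact le_of_not_gt hlt
      · exact hub e' h

theorem foldl_pvStepA_nodup_keys (l : List (Int × String × String))
    (d : PySem.Dict String (Int × String)) (h : d.keys.Nodup) :
    (l.foldl pvStepA d).keys.Nodup := by
  induction l generalizing d with
  | nil => exact h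
  | cons e l ih =>
    rw [List.foldl_cons]
    apply ih
    unfold pvStepA
    cases d.get? e.2.2 with
    | none => exact PySem.Dict.nodup_keys_insert _ _ _ h
    | some v =>
      dsimp only
      split_ifs
      · exact PySem.Dict.nodup_keys_insert _ _ _ h
      · exact h

def IsRep (all : List (Int × String × String)) (x : Int × String × String) : Prop :=
  x ∈ all ∧ ∀ y ∈ all, y.2.2 = x.2.2 → key3 y ≤ key3 x

theorem key3_le_of_pair_le {a b : Int × String} {t : String} :
    toLex a ≤ toLex b ↔ key3 (a.1, a.2, t) ≤ key3 (b.1, b.2, t) := by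
  unfold key3
  rw [Prod.Lex.toLex_le_toLex, Prod.Lex.toLex_le_toLex, Prod.Lex.toLex_le_toLex]
  constructor
  · rintro (h | ⟨h1, h2⟩)
    · exact Or.inl h
    · rcases lt_or_eq_of_le h2 with h3 | h3
      · exact Or.inr ⟨h1, Or.inl h3⟩
      · exact Or.inr ⟨h1, Or.inr ⟨h3, le_refl _⟩⟩
  · rintro (h | ⟨h1, h | ⟨h2, -⟩⟩)
    · exact Or.inl h
    · exact Or.inr ⟨h1, le_of_lt h⟩
    · exact Or.inr ⟨h1, le_of_eq h2⟩

theorem key3_inj {x y : Int × String × String} (h : key3 x = key3 y) : x = y := by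
  unfold key3 at h
  rw [toLex_inj, Prod.mk.injEq, toLex_inj, Prod.mk.injEq] at h
  obtain ⟨h1, h2, h3⟩ := h
  exact Prod.ext h1 (Prod.ext h2 h3)

theorem pvOmax_filter_char (all : List (Int × String × String)) (x : Int × String × String) :
    ((all.filter (fun e => e.2.2 == x.2.2)).foldl pvOmax none = some (x.1, x.2.1)) ↔
      IsRep all x := by
  have hmemf : ∀ y : Int × String × String,
      y ∈ all.filter (fun e => e.2.2 == x.2.2) ↔ y ∈ all ∧ y.2.2 = x.2.2 := by
    intro y; rw [List.mem_filter]; simp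
  constructor
  · intro h
    cases hps : all.filter (fun e => e.2.2 == x.2.2) with
    | nil => rw [hps] at h; exact absurd h (by simp)
    | cons e ps =>
      rw [hps, List.foldl_cons] at h
      have hstep : pvOmax none e = some (e.1, e.2.1) := rfl
      rw [hstep] at h
      obtain ⟨m, hm, hsrc, hge, hub⟩ := foldl_pvOmax_some ps (e.1, e.2.1)
      rw [hm] at h
      have hmx : m = (x.1, x.2.1) := by injection h
      -- the max comes from some element e0 of the filtered list
      obtain ⟨e0, he0, hpe0⟩ : ∃ e0 ∈ all.filter (fun e => e.2.2 == x.2.2), (e0.1, e0.2.1) = m := by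
        rcases hsrc with h' | ⟨e', he', hpe⟩
        · exact ⟨e, by rw [hps]; exact List.mem_cons_self, h'.symm⟩
        · exact ⟨e', by rw [hps]; exact List.mem_cons_of_mem _ he', hpe⟩
      obtain ⟨he0all, he0t⟩ := (hmemf e0).mp he0
      have he0x : e0 = x := by
        have : (e0.1, e0.2.1) = (x.1, x.2.1) := by rw [hpe0, hmx]
        have h1 := congrArg Prod.fst this
        have h2 := congrArg Prod.snd this
        exact Prod.ext h1 (Prod.ext h2 he0t)
      refine ⟨he0x ▸ he0all, ?_⟩
      intro y hy hyt
      have hyf : y ∈ all.filter (fun e => e.2.2 == x.2.2) := (hmemf y).mpr ⟨hy, hyt⟩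
      have hyb : toLex (y.1, y.2.1) ≤ toLex m := by
        rw [hps] at hyf
        rcases List.mem_cons.mp hyf with h' | h'
        · subst h'; exact hge
        · exact hub _ h'
      rw [hmx] at hyb
      have hy3 : (y.1, y.2.1, x.2.2) = y := by rw [← hyt]
      have h2 : key3 (y.1, y.2.1, x.2.2) ≤ key3 (x.1, x.2.1, x.2.2) :=
        (key3_le_of_pair_le (t := x.2.2)).mp hyb
      rw [hy3] at h2
      exact h2
  · rintro ⟨hx, hmax⟩
    have hxf : x ∈ all.filter (fun e => e.2.2 == x.2.2) := (hmemf x).mpr ⟨hx, rfl⟩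
    cases hps : all.filter (fun e => e.2.2 == x.2.2) with
    | nil => rw [hps] at hxf; exact absurd hxf (by simp)
    | cons e ps =>
      rw [List.foldl_cons]
      have hstep : pvOmax none e = some (e.1, e.2.1) := rfl
      rw [hstep]
      obtain ⟨m, hm, hsrc, hge, hub⟩ := foldl_pvOmax_some ps (e.1, e.2.1)
      rw [hm]
      -- m is the pair of some element of the filtered list
      obtain ⟨e0, he0, hpe0⟩ : ∃ e0 ∈ all.filter (fun e => e.2.2 == x.2.2), (e0.1, e0.2.1) = m := by
        rcases hsrc with h' | ⟨e', he', hpe⟩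
        · exact ⟨e, by rw [hps]; exact List.mem_cons_self, h'.symm⟩
        · exact ⟨e', by rw [hps]; exact List.mem_cons_of_mem _ he', hpe⟩
      obtain ⟨he0all, he0t⟩ := (hmemf e0).mp he0
      have hle1 : toLex (x.1, x.2.1) ≤ toLex m := by
        rw [hps] at hxf
        rcases List.mem_cons.mp hxf with h' | h'
        · rw [h']; exact hge
        · exact hub _ h'
      have hle2 : toLex m ≤ toLex (x.1, x.2.1) := by
        have he3 : (e0.1, e0.2.1, x.2.2) = e0 := by rw [← he0t]
        have hk : key3 (e0.1, e0.2.1, x.2.2) ≤ key3 (x.1, x.2.1, x.2.2) := by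
          rw [he3]; exact hmax e0 he0all he0t
        rw [← hpe0]
        exact key3_le_of_pair_le.mpr hk
      have : toLex m = toLex (x.1, x.2.1) := le_antisymm hle2 hle1
      rw [toLex_inj] at this
      rw [this]

theorem mem_tmp2_iff (all : List (Int × String × String)) (x : Int × String × String) :
    x ∈ ((all.foldl pvStepA PySem.Dict.empty).items.map (fun kv => (kv.2.1, kv.2.2, kv.1))) ↔
      IsRep all x := by
  have hnd : (all.foldl pvStepA PySem.Dict.empty).keys.Nodup :=
    foldl_pvStepA_nodup_keys all _ (by simp [PySem.Dict.keys_empty])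
  have hstep1 : x ∈ ((all.foldl pvStepA PySem.Dict.empty).items.map
      (fun kv => (kv.2.1, kv.2.2, kv.1))) ↔
      (x.2.2, (x.1, x.2.1)) ∈ (all.foldl pvStepA PySem.Dict.empty).items := by
    rw [List.mem_map]
    constructor
    · rintro ⟨kv, hkv, heq⟩
      have h1 := congrArg (fun p => p.1) heq
      have h2 := congrArg (fun p => p.2.1) heq
      have h3 := congrArg (fun p => p.2.2) heq
      simp at h1 h2 h3
      have : kv = (x.2.2, (x.1, x.2.1)) := by
        refine Prod.ext h3 (Prod.ext h1 h2)
      rw [← this]; exact hkv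
    · intro h
      exact ⟨(x.2.2, (x.1, x.2.1)), h, rfl⟩
  rw [hstep1, ← PySem.Dict.get?_eq_some_iff_mem_items _ _ _ hnd,
    foldl_pvStepA_get?, PySem.Dict.get?_empty]
  exact pvOmax_filter_char all x

def pvFirsts : List (Int × String × String) → PySem.Set String → List (Int × String × String)
  | [], _ => []
  | e :: l, seen =>
      if PySem.Set.contains seen e.2.2 then pvFirsts l seen
      else e :: pvFirsts l (PySem.Set.add seen e.2.2)

theorem foldl_pvStepB_snd (l : List (Int × String × String)) (seen : PySem.Set String)
    (out : List (Int × String × String)) :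
    (l.foldl pvStepB (seen, out)).2 = out ++ pvFirsts l seen := by
  induction l generalizing seen out with
  | nil => simp [pvFirsts]
  | cons e l ih =>
    rw [List.foldl_cons, pvFirsts]
    by_cases h : PySem.Set.contains seen e.2.2 = true
    · rw [if_pos h]
      have hst : pvStepB (seen, out) e = (seen, out) := by
        simp [pvStepB]
        exact (PySem.Set.contains_iff _ _).mp h
      rw [hst, ih]
    · rw [if_neg h]
      have hst : pvStepB (seen, out) e = (PySem.Set.add seen e.2.2, out ++ [e]) := by
        simp [pvStepB]
        exact fun hm => h ((PySem.Set.contains_iff _ _).mpr hm)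
      rw [hst, ih, List.append_assoc]
      rfl

theorem pvFirsts_sublist (l : List (Int × String × String)) (seen : PySem.Set String) :
    (pvFirsts l seen).Sublist l := by
  induction l generalizing seen with
  | nil => simp [pvFirsts]
  | cons e l ih =>
    rw [pvFirsts]
    split_ifs with h
    · exact List.Sublist.cons _ (ih seen)
    · exact List.Sublist.cons₂ _ (ih _)

theorem mem_pvFirsts (l : List (Int × String × String)) (seen : PySem.Set String)
    (hpw : l.Pairwise (fun a b => key3 b ≤ key3 a)) (x : Int × String × String) :
    x ∈ pvFirsts l seen ↔
      x ∈ l ∧ x.2.2 ∉ seen ∧ ∀ y ∈ l, y.2.2 = x.2.2 → key3 y ≤ key3 x := by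
  induction l generalizing seen with
  | nil => simp [pvFirsts]
  | cons e l ih =>
    obtain ⟨hhead, htail⟩ := List.pairwise_cons.mp hpw
    rw [pvFirsts]
    split_ifs with hc
    · have hcs : e.2.2 ∈ seen := (PySem.Set.contains_iff _ _).mp hc
      rw [ih seen htail]
      constructor
      · rintro ⟨hxl, hxs, hmax⟩
        refine ⟨List.mem_cons_of_mem _ hxl, hxs, ?_⟩
        intro y hy hyt
        rcases List.mem_cons.mp hy with h | h
        · subst h
          exact absurd (hyt ▸ hcs) hxs
        · exact hmax y h hyt
      · rintro ⟨hxl, hxs, hmax⟩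
        rcases List.mem_cons.mp hxl with h | h
        · subst h; exact absurd hcs hxs
        · exact ⟨h, hxs, fun y hy hyt => hmax y (List.mem_cons_of_mem _ hy) hyt⟩
    · have hcs : e.2.2 ∉ seen := fun h => hc ((PySem.Set.contains_iff _ _).mpr h)
      rw [List.mem_cons, ih _ htail]
      constructor
      · rintro (h | ⟨hxl, hxs, hmax⟩)
        · subst h
          refine ⟨List.mem_cons_self, hcs, ?_⟩
          intro y hy hyt
          rcases List.mem_cons.mp hy with h | h
          · subst h; exact le_refl _
          · exact hhead y h
        · have hxs' : x.2.2 ∉ seen ∧ x.2.2 ≠ e.2.2 := by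
            rw [PySem.Set.mem_add] at hxs
            push_neg at hxs
            exact hxs
          refine ⟨List.mem_cons_of_mem _ hxl, hxs'.1, ?_⟩
          intro y hy hyt
          rcases List.mem_cons.mp hy with h | h
          · subst h; exact absurd hyt hxs'.2.symm
          · exact hmax y h hyt
      · rintro ⟨hxl, hxs, hmax⟩
        rcases List.mem_cons.mp hxl with h | h
        · exact Or.inl h
        · by_cases het : x.2.2 = e.2.2
          · -- x in tail with e's title: then key3 e ≤ key3 x and key3 x ≤ key3 e, so x = e
            have h1 : key3 e ≤ key3 x := hmax e List.mem_cons_self het.symm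
            have h2 : key3 x ≤ key3 e := hhead x h
            have : x = e := key3_inj (le_antisymm h2 h1)
            exact Or.inl this
          · refine Or.inr ⟨h, ?_, ?_⟩
            · rw [PySem.Set.mem_add]
              push_neg
              exact ⟨hxs, het⟩
            · intro y hy hyt
              exact hmax y (List.mem_cons_of_mem _ hy) hyt

theorem pvFirsts_not_mem_seen (l : List (Int × String × String)) (seen : PySem.Set String)
    (x : Int × String × String) (h : x ∈ pvFirsts l seen) : x.2.2 ∉ seen := by
  induction l generalizing seen with
  | nil => simp [pvFirsts] at h
  | cons e l ih =>
    rw [pvFirsts] at h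
    split_ifs at h with hc
    · exact ih seen h
    · rcases List.mem_cons.mp h with h' | h'
      · subst h'
        exact fun hm => hc ((PySem.Set.contains_iff _ _).mpr hm)
      · intro hm
        exact ih _ h' (by rw [PySem.Set.mem_add]; exact Or.inl hm)

theorem pvFirsts_titles_nodup (l : List (Int × String × String)) (seen : PySem.Set String) :
    ((pvFirsts l seen).map (fun x => x.2.2)).Nodup := by
  induction l generalizing seen with
  | nil => simp [pvFirsts]
  | cons e l ih =>
    rw [pvFirsts]
    split_ifs with hc
    · exact ih seen
    · rw [List.map_cons, List.nodup_cons]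
      refine ⟨?_, ih _⟩
      intro hm
      rw [List.mem_map] at hm
      obtain ⟨y, hy, hyt⟩ := hm
      refine pvFirsts_not_mem_seen _ _ _ hy ?_
      rw [PySem.Set.mem_add]
      exact Or.inr hyt

theorem zipper2_eq (l_paper_id l_title : List String) (l_score : List Int) :
    (PySem.List.sorted
        (((l_score.zip (l_paper_id.zip l_title)).foldl pvStepA PySem.Dict.empty).items.map
          (fun kv => (kv.2.1, kv.2.2, kv.1))) key3 false).reverse =
      ((PySem.List.sorted (l_score.zip (l_paper_id.zip l_title)) key3 true).foldl pvStepB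
        (PySem.Set.empty, [])).2 := by
  set all := l_score.zip (l_paper_id.zip l_title) with hall
  set tmp2 := ((all.foldl pvStepA PySem.Dict.empty).items.map
    (fun kv => (kv.2.1, kv.2.2, kv.1))) with htmp2
  set sa := PySem.List.sorted all key3 true with hsa
  rw [foldl_pvStepB_snd, List.nil_append]
  set out := pvFirsts sa PySem.Set.empty with hout
  have hpw : sa.Pairwise (fun a b => key3 b ≤ key3 a) := PySem.List.sorted_pairwise_rev all key3
  have hout_mem : ∀ x, x ∈ out ↔ IsRep all x := by
    intro x
    rw [hout, mem_pvFirsts sa _ hpw]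
    unfold IsRep
    have hms : ∀ y : Int × String × String, y ∈ sa ↔ y ∈ all := by
      intro y; exact PySem.List.mem_sorted all key3 true y
    constructor
    · rintro ⟨h1, -, h3⟩
      exact ⟨(hms x).mp h1, fun y hy hyt => h3 y ((hms y).mpr hy) hyt⟩
    · rintro ⟨h1, h3⟩
      refine ⟨(hms x).mpr h1, ?_, fun y hy hyt => h3 y ((hms y).mp hy) hyt⟩
      simp [PySem.Set.empty]
  have htmp2_mem : ∀ x, x ∈ tmp2 ↔ IsRep all x := mem_tmp2_iff all
  have hout_nd : out.Nodup := List.Nodup.of_map _ (pvFirsts_titles_nodup sa _)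
  have htmp2_nd : tmp2.Nodup := by
    have hk : ((all.foldl pvStepA PySem.Dict.empty).keys).Nodup :=
      foldl_pvStepA_nodup_keys all _ (by simp [PySem.Dict.keys_empty])
    simp only [PySem.Dict.keys] at hk
    have hitems : ((all.foldl pvStepA PySem.Dict.empty).items).Nodup :=
      List.Nodup.of_map _ hk
    refine List.Nodup.map ?_ hitems
    intro a b hab
    have h1 := congrArg (fun p => p.2.2) hab
    have h2 := congrArg (fun p => p.1) hab
    have h3 := congrArg (fun p => p.2.1) hab
    simp at h1 h2 h3
    exact Prod.ext h1 (Prod.ext h2 h3)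
  have hperm : out.Perm tmp2 :=
    (List.perm_ext_iff_of_nodup hout_nd htmp2_nd).mpr
      (fun a => (hout_mem a).trans (htmp2_mem a).symm)
  have hgt : out.Pairwise (fun a b => key3 b < key3 a) := by
    have hge : out.Pairwise (fun a b => key3 b ≤ key3 a) :=
      List.Pairwise.sublist (pvFirsts_sublist sa _) hpw
    have hne : out.Pairwise (fun a b => a.2.2 ≠ b.2.2) :=
      List.pairwise_map.mp (pvFirsts_titles_nodup sa _)
    refine (hge.and hne).imp ?_
    rintro a b ⟨hle, hnet⟩
    refine lt_of_le_of_ne hle ?_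
    intro he
    exact hnet (congrArg (fun z => z.2.2) (key3_inj he).symm)
  have hA : PySem.List.sorted tmp2 key3 false = out.reverse := by
    refine PySem.List.sorted_eq_of_perm_of_pairwise_lt tmp2 out.reverse key3 ?_ ?_
    · exact (List.reverse_perm out).trans hperm
    · rw [List.pairwise_reverse]
      exact hgt
  rw [hA, List.reverse_reverse]

-- ===== VERDICT (by name: the statement is the Claim_ definition above) =====
theorem zipper2_spec : Claim_equal_zipper2 := by
  intro l_paper_id l_title l_score _
  exact zipper2_eq l_paper_id l_title l_score
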